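-- pv_equiv track=rewrite | github.com/LL-Laurian/Python_School | a2/elevation.py | adjacent_top_bottom_cells
-- ===== SOURCE A (Python) =====
-- def adjacent_top_bottom_cells(cell: list[int],
--                               dimension: int) -> list[list[int]]:
--     """Return a list of cells adjacent to cell cell on the top or bottom row an
--     elevation map with dimensions dimension x dimension.
--
--     Precondition: cell is a valid cell for an elevation map with
--                   dimensions dimension x dimension.
--                   cell[0] == dimension - 1 or cell[0] == 0
--                   cell[1] != 0 and cell[1] != dimension - 1
--
--     >>> adjacent_cells = adjacent_top_bottom_cells([0, 1], 3)
--     >>> adjacent_cells.sort()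
--     >>> adjacent_cells
--     [[0, 0], [0, 2], [1, 0], [1, 1], [1, 2]]
--     >>> adjacent_cells = adjacent_top_bottom_cells([2, 1], 3)
--     >>> adjacent_cells.sort()
--     >>> adjacent_cells
--     [[1, 0], [1, 1], [1, 2], [2, 0], [2, 2]]
--     >>> adjacent_cells = adjacent_top_bottom_cells([0, 2], 4)
--     >>> adjacent_cells.sort()
--     >>> adjacent_cells
--     [[0, 1], [0, 3], [1, 1], [1, 2], [1, 3]]
--     >>> adjacent_cells = adjacent_top_bottom_cells([3, 2], 4)
--     >>> adjacent_cells.sort()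
--     >>> adjacent_cells
--     [[2, 1], [2, 2], [2, 3], [3, 1], [3, 3]]
--
--     """
--     top_bottom = []
--     last_valid = dimension - 1
--     if cell[1] in range(1, last_valid):
--         for i in range(2):
--             for j in range(-1, 2):
--                 if cell[0] == 0 and [i, j] != [0, 0]:
--                     adjacent = [i, cell[1] + j]
--                     top_bottom.append(adjacent)
--                 elif cell[0] == last_valid and [i, j] != [0, 0]:
--                     adjacent = [last_valid - i, cell[1] + j]
--                     top_bottom.append(adjacent)
--     return top_bottom
-- ===== SOURCE B (Python) =====
-- def adjacent_top_bottom_cells(cell: list[int],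
--                               dimension: int) -> list[list[int]]:
--     """Closed-form enumeration of the 5 adjacent cells (no nested loops)."""
--     c = cell[1]
--     r = cell[0]
--     if not (1 <= c <= dimension - 2):
--         return []
--     if r != 0 and r != dimension - 1:
--         return []
--     inner = 1 if r == 0 else dimension - 2
--     return [[r, c - 1], [r, c + 1],
--             [inner, c - 1], [inner, c], [inner, c + 1]]
-- ===== Notes on version B (the rewrite author's own statement) =====
-- stated objective: simpler
-- what changed: Replaces the 2x3 nested loop with skip/mirror branches by two guard checks and one closed-form literal list of the five adjacent cells.
import Mathlib
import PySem

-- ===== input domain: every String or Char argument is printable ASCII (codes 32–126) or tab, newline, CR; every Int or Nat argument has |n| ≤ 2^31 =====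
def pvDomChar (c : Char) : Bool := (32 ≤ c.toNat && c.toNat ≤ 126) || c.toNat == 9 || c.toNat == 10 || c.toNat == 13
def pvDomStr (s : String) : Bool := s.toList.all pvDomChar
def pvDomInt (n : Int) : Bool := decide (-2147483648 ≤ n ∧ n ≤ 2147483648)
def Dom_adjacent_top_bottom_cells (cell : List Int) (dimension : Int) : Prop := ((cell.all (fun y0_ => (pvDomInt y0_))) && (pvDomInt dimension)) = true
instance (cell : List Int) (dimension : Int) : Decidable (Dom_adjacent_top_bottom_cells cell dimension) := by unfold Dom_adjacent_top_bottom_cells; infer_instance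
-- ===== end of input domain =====

-- B replaces A's 2x3 nested loop with two guard checks and a closed-form list of the five cells (objective: simpler).


-- ===== PORT A =====
-- Literal port: the `cell[1] in range(1, last_valid)` membership test is ported
-- arithmetically (1 ≤ x ∧ x < last_valid), exact for a step-1 range.
-- Pre_ guarantees cell has length ≥ 2, so the `.getD 0` defaults are never taken.
def adjacent_top_bottom_cells (cell : List Int) (dimension : Int) : List (List Int) :=
  let top_bottom : List (List Int) := []
  let last_valid := dimension - 1
  let c1 := (PySem.List.pyGet? cell 1).getD 0
  if 1 ≤ c1 ∧ c1 < last_valid then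
    (PySem.List.pyRange 0 2 1).foldl (fun acc i =>
      (PySem.List.pyRange (-1) 2 1).foldl (fun acc j =>
        let c0 := (PySem.List.pyGet? cell 0).getD 0
        if c0 = 0 ∧ ¬([i, j] = ([0, 0] : List Int)) then
          acc ++ [[i, c1 + j]]
        else if c0 = last_valid ∧ ¬([i, j] = ([0, 0] : List Int)) then
          acc ++ [[last_valid - i, c1 + j]]
        else acc) acc) top_bottom
  else top_bottom

-- ===== PORT B =====
def adjacent_top_bottom_cells_alt (cell : List Int) (dimension : Int) : List (List Int) :=
  let c := (PySem.List.pyGet? cell 1).getD 0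
  let r := (PySem.List.pyGet? cell 0).getD 0
  if ¬(1 ≤ c ∧ c ≤ dimension - 2) then []
  else if r ≠ 0 ∧ r ≠ dimension - 1 then []
  else
    let inner := if r = 0 then 1 else dimension - 2
    [[r, c - 1], [r, c + 1], [inner, c - 1], [inner, c], [inner, c + 1]]

-- ===== PRECONDITION & SPEC =====
-- Pre_ excludes only inputs where Python A raises IndexError (cell shorter than 2).
def Pre_adjacent_top_bottom_cells (cell : List Int) (dimension : Int) : Prop := 2 ≤ cell.length
instance (cell : List Int) (dimension : Int) : Decidable (Pre_adjacent_top_bottom_cells cell dimension) := by unfold Pre_adjacent_top_bottom_cells; infer_instance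
def pvWitness_adjacent_top_bottom_cells : List Int × Int := ([0, 1], 3)
def Spec_adjacent_top_bottom_cells (cell : List Int) (dimension : Int) (out : List (List Int)) : Prop := out = adjacent_top_bottom_cells_alt cell dimension
instance (cell : List Int) (dimension : Int) (out : List (List Int)) : Decidable (Spec_adjacent_top_bottom_cells cell dimension out) := by unfold Spec_adjacent_top_bottom_cells; infer_instance

-- ===== CLAIM (what is proved, stated in full; the proofs are below) =====
def Claim_equal_adjacent_top_bottom_cells : Prop := ∀ (cell : List Int) (dimension : Int), Dom_adjacent_top_bottom_cells cell dimension → Pre_adjacent_top_bottom_cells cell dimension → Spec_adjacent_top_bottom_cells cell dimension (adjacent_top_bottom_cells cell dimension)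

-- ===== LEMMAS AND PROOFS =====
theorem pyRange01 : PySem.List.pyRange 0 2 1 = [0, 1] := by decide
theorem pyRangeNeg : PySem.List.pyRange (-1) 2 1 = [-1, 0, 1] := by decide

-- ===== VERDICT (by name: the statement is the Claim_ definition above) =====
set_option maxHeartbeats 2000000 in
theorem adjacent_top_bottom_cells_spec : Claim_equal_adjacent_top_bottom_cells := by
  intro cell dimension _ _
  unfold Spec_adjacent_top_bottom_cells adjacent_top_bottom_cells adjacent_top_bottom_cells_alt
  simp only [pyRange01, pyRangeNeg, List.foldl]
  generalize (PySem.List.pyGet? cell 1).getD 0 = c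
  generalize (PySem.List.pyGet? cell 0).getD 0 = r
  simp only [List.cons.injEq, and_self, and_true, not_and, not_false_iff,
    show ((-1 : Int) = 0) = False from by simp, show ((1 : Int) = 0) = False from by simp,
    show ((0 : Int) = 0) = True from by simp, false_and, and_false, true_implies, false_implies,
    if_true, if_false, not_true_eq_false, not_false_eq_true, iff_true,
    List.nil_append, List.append_nil]
  by_cases h0 : r = 0
  · subst h0
    split_ifs <;> first | rfl | omega |
      (simp only [List.append_assoc, List.singleton_append, List.cons_append, List.nil_append,
        List.cons.injEq, and_true, true_and, and_self]; omega)
  · split_ifs <;> first | rfl | omega |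
      (simp only [List.append_assoc, List.singleton_append, List.cons_append, List.nil_append,
        List.cons.injEq, and_true, true_and, and_self]; omega)
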